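-- pv_equiv track=rewrite | github.com/draew6/fastroutes | fastroutes/route.py | get_method
-- ===== SOURCE A (Python) =====
-- from typing import Any, Literal, get_origin, get_args, Union
--
-- METHOD = Literal["GET", "POST", "PUT", "DELETE", "PATCH", "OPTIONS", "HEAD"]
--
-- def get_method(methods: set) -> METHOD:
--     method_priority: list[METHOD] = [
--         "GET",
--         "POST",
--         "DELETE",
--         "PUT",
--         "PATCH",
--         "HEAD",
--         "OPTIONS",
--     ]
--     for method in method_priority:
--         if method in methods:
--             return method
--     raise ValueError(
--         f"Method not found in {methods}. Expected one of {method_priority}."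
--     )
-- ===== SOURCE B (Python) =====
-- def get_method(methods: set) -> str:
--     method_priority = [
--         "GET",
--         "POST",
--         "DELETE",
--         "PUT",
--         "PATCH",
--         "HEAD",
--         "OPTIONS",
--     ]
--     priority = {"GET": 0, "POST": 1, "DELETE": 2, "PUT": 3, "PATCH": 4, "HEAD": 5, "OPTIONS": 6}
--     best = min((priority.get(m, 7) for m in methods), default=7)
--     if best == 7:
--         raise ValueError(
--             f"Method not found in {methods}. Expected one of {method_priority}."
--         )
--     return method_priority[best]
-- ===== Notes on version B (the rewrite author's own statement) =====
-- stated objective: alternative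
-- what changed: B maps each method to its rank with a dict, computes the minimum rank over the input in one pass and indexes back into the priority list, instead of scanning the priority list for the first method present.
import Mathlib
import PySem

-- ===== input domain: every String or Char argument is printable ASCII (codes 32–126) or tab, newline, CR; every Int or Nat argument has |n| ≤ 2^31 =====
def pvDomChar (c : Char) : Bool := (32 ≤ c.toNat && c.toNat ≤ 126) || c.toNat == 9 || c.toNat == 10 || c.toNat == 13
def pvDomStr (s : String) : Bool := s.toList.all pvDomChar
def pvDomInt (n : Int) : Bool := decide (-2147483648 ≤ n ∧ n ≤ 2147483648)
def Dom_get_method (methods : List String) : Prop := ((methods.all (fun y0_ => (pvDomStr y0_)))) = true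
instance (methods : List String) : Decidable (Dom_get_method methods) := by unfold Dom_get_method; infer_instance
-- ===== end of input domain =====

-- B replaces A's scan of the fixed priority list by a one-pass minimum of dict ranks over the
-- input, indexing back into the priority list (objective: alternative).

-- ===== PORT A =====
def get_method (methods : List String) : String :=
  let method_priority : List String := ["GET", "POST", "DELETE", "PUT", "PATCH", "HEAD", "OPTIONS"]
  match method_priority.find? (fun m => methods.contains m) with
  | some m => m
  | none => ""  -- Python raises ValueError here; excluded by Pre_get_method

-- ===== PORT B =====
def get_method_alt (methods : List String) : String :=
  let method_priority : List String := ["GET", "POST", "DELETE", "PUT", "PATCH", "HEAD", "OPTIONS"]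
  let priority : PySem.Dict String Int :=
    PySem.Dict.ofList [("GET", 0), ("POST", 1), ("DELETE", 2), ("PUT", 3), ("PATCH", 4), ("HEAD", 5), ("OPTIONS", 6)]
  let best : Int := (methods.map (fun m => priority.getD m 7)).foldl min 7
  if best = 7 then ""  -- Python raises ValueError here; excluded by Pre_get_method
  else (PySem.List.pyGet? method_priority best).getD ""

-- ===== PRECONDITION & SPEC =====
-- Pre_ excludes exactly the inputs containing none of the seven methods, on which A raises ValueError.
def Pre_get_method (methods : List String) : Prop :=
  (["GET", "POST", "DELETE", "PUT", "PATCH", "HEAD", "OPTIONS"].any (fun m => methods.contains m)) = true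
instance (methods : List String) : Decidable (Pre_get_method methods) := by unfold Pre_get_method; infer_instance
def pvWitness_get_method : List String := ["POST", "HEAD"]

def Spec_get_method (methods : List String) (out : String) : Prop := out = get_method_alt methods
instance (methods : List String) (out : String) : Decidable (Spec_get_method methods out) := by unfold Spec_get_method; infer_instance

-- ===== CLAIM (what is proved, stated in full; the proofs are below) =====
def Claim_equal_get_method : Prop := ∀ (methods : List String), Dom_get_method methods → Pre_get_method methods → Spec_get_method methods (get_method methods)

-- ===== LEMMAS AND PROOFS =====

/-- the rank function B's dict computes -/
def pvRank (m : String) : Int :=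
  if m = "GET" then 0 else if m = "POST" then 1 else if m = "DELETE" then 2
  else if m = "PUT" then 3 else if m = "PATCH" then 4 else if m = "HEAD" then 5
  else if m = "OPTIONS" then 6 else 7

lemma pvRank_eq_getD (m : String) :
    (PySem.Dict.ofList [("GET", (0:Int)), ("POST", 1), ("DELETE", 2), ("PUT", 3), ("PATCH", 4), ("HEAD", 5), ("OPTIONS", 6)]).getD m 7 = pvRank m := by
  have h : PySem.Dict.ofList [("GET", (0:Int)), ("POST", 1), ("DELETE", 2), ("PUT", 3), ("PATCH", 4), ("HEAD", 5), ("OPTIONS", 6)]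
      = PySem.Dict.mk [("GET", (0:Int)), ("POST", 1), ("DELETE", 2), ("PUT", 3), ("PATCH", 4), ("HEAD", 5), ("OPTIONS", 6)] := by decide
  rw [h]
  simp only [PySem.Dict.getD_eq_get?_getD, PySem.Dict.get?_mk_cons, pvRank, beq_iff_eq,
    @eq_comm String "GET" m, @eq_comm String "POST" m, @eq_comm String "DELETE" m,
    @eq_comm String "PUT" m, @eq_comm String "PATCH" m, @eq_comm String "HEAD" m,
    @eq_comm String "OPTIONS" m]
  split_ifs <;> rfl

lemma pvRank_nonneg (m : String) : 0 ≤ pvRank m := by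
  unfold pvRank; split_ifs <;> norm_num

lemma foldl_min_le_init (l : List Int) (a : Int) : l.foldl min a ≤ a := by
  induction l generalizing a with
  | nil => simp
  | cons x t ih => exact le_trans (ih (min a x)) (min_le_left _ _)

lemma foldl_min_le_mem (l : List Int) (a x : Int) (hx : x ∈ l) : l.foldl min a ≤ x := by
  induction l generalizing a with
  | nil => simp at hx
  | cons y t ih =>
    rcases List.mem_cons.mp hx with h | h
    · subst h; exact le_trans (foldl_min_le_init t _) (min_le_right _ _)
    · exact ih (min a y) h

lemma foldl_min_cases (l : List Int) (a : Int) : l.foldl min a = a ∨ l.foldl min a ∈ l := by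
  induction l generalizing a with
  | nil => simp
  | cons x t ih =>
    simp only [List.foldl_cons]
    rcases ih (min a x) with h | h
    · rcases min_cases a x with ⟨he, _⟩ | ⟨he, _⟩
      · exact Or.inl (by rw [h, he])
      · exact Or.inr (by rw [h, he]; exact List.mem_cons_self)
    · exact Or.inr (List.mem_cons_of_mem _ h)

lemma best_eq (methods : List String) (k : Int) (m0 : String) (hm0 : m0 ∈ methods)
    (hr : pvRank m0 = k) (hk : k ≤ 7) (hlow : ∀ m ∈ methods, k ≤ pvRank m) :
    (methods.map pvRank).foldl min 7 = k := by
  have hle : (methods.map pvRank).foldl min 7 ≤ k := by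
    rw [← hr]; exact foldl_min_le_mem _ _ _ (List.mem_map_of_mem hm0)
  have hge : k ≤ (methods.map pvRank).foldl min 7 := by
    rcases foldl_min_cases (methods.map pvRank) 7 with h | h
    · omega
    · rcases List.mem_map.mp h with ⟨m, hm, hmr⟩
      rw [← hmr]; exact hlow m hm
  omega

-- ===== VERDICT (by name: the statement is the Claim_ definition above) =====
theorem get_method_spec : Claim_equal_get_method := by
  intro methods _ hpre
  simp only [Spec_get_method, get_method, get_method_alt]
  have hmap : methods.map (fun m => (PySem.Dict.ofList [("GET", (0:Int)), ("POST", 1), ("DELETE", 2), ("PUT", 3), ("PATCH", 4), ("HEAD", 5), ("OPTIONS", 6)]).getD m 7)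
      = methods.map pvRank := List.map_congr_left (fun m _ => pvRank_eq_getD m)
  rw [hmap]
  by_cases hG : "GET" ∈ methods
  · rw [List.find?_cons_of_pos (by simpa using hG),
      best_eq methods 0 "GET" hG rfl (by norm_num) (fun m _ => pvRank_nonneg m)]
    decide
  · rw [List.find?_cons_of_neg (by simpa using hG)]
    by_cases hP : "POST" ∈ methods
    · rw [List.find?_cons_of_pos (by simpa using hP),
        best_eq methods 1 "POST" hP rfl (by norm_num) ?_]
      · decide
      · intro m hm; unfold pvRank
        split_ifs with e1 <;> try omega
        subst e1; exact absurd hm hG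
    · rw [List.find?_cons_of_neg (by simpa using hP)]
      by_cases hD : "DELETE" ∈ methods
      · rw [List.find?_cons_of_pos (by simpa using hD),
          best_eq methods 2 "DELETE" hD rfl (by norm_num) ?_]
        · decide
        · intro m hm; unfold pvRank
          split_ifs with e1 e2 <;> try omega
          · subst e1; exact absurd hm hG
          · subst e2; exact absurd hm hP
      · rw [List.find?_cons_of_neg (by simpa using hD)]
        by_cases hU : "PUT" ∈ methods
        · rw [List.find?_cons_of_pos (by simpa using hU),
            best_eq methods 3 "PUT" hU rfl (by norm_num) ?_]
          · decide
          · intro m hm; unfold pvRank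
            split_ifs with e1 e2 e3 <;> try omega
            · subst e1; exact absurd hm hG
            · subst e2; exact absurd hm hP
            · subst e3; exact absurd hm hD
        · rw [List.find?_cons_of_neg (by simpa using hU)]
          by_cases hA : "PATCH" ∈ methods
          · rw [List.find?_cons_of_pos (by simpa using hA),
              best_eq methods 4 "PATCH" hA rfl (by norm_num) ?_]
            · decide
            · intro m hm; unfold pvRank
              split_ifs with e1 e2 e3 e4 <;> try omega
              · subst e1; exact absurd hm hG
              · subst e2; exact absurd hm hP
              · subst e3; exact absurd hm hD
              · subst e4; exact absurd hm hU
          · rw [List.find?_cons_of_neg (by simpa using hA)]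
            by_cases hH : "HEAD" ∈ methods
            · rw [List.find?_cons_of_pos (by simpa using hH),
                best_eq methods 5 "HEAD" hH rfl (by norm_num) ?_]
              · decide
              · intro m hm; unfold pvRank
                split_ifs with e1 e2 e3 e4 e5 <;> try omega
                · subst e1; exact absurd hm hG
                · subst e2; exact absurd hm hP
                · subst e3; exact absurd hm hD
                · subst e4; exact absurd hm hU
                · subst e5; exact absurd hm hA
            · rw [List.find?_cons_of_neg (by simpa using hH)]
              by_cases hO : "OPTIONS" ∈ methods
              · rw [List.find?_cons_of_pos (by simpa using hO),
                  best_eq methods 6 "OPTIONS" hO rfl (by norm_num) ?_]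
                · decide
                · intro m hm; unfold pvRank
                  split_ifs with e1 e2 e3 e4 e5 e6 <;> try omega
                  · subst e1; exact absurd hm hG
                  · subst e2; exact absurd hm hP
                  · subst e3; exact absurd hm hD
                  · subst e4; exact absurd hm hU
                  · subst e5; exact absurd hm hA
                  · subst e6; exact absurd hm hH
              · exfalso
                simp only [Pre_get_method, List.any_eq_true] at hpre
                obtain ⟨m, hm, hc⟩ := hpre
                have hmem : m ∈ methods := by simpa using hc
                simp only [List.mem_cons, List.not_mem_nil, or_false] at hm
                rcases hm with h|h|h|h|h|h|h <;> subst h <;>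
                  first
                  | exact hG hmem | exact hP hmem | exact hD hmem | exact hU hmem
                  | exact hA hmem | exact hH hmem | exact hO hmem
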